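-- pv_equiv track=rewrite | github.com/bangtugu/Algorithm | PROGRAMMERS/호텔_방_배정.py | solution
-- ===== SOURCE A (Python) =====
-- def solution(k, room_number):
--
--     sett = set()
--     check_dic = {}
--     answer = [0]*len(room_number)
--     for i in range(len(room_number)):
--         n = room_number[i]-1
--
--         while n in sett:
--             new = n + check_dic[n]
--             check_dic[n] += 1
--             if new in sett:
--                 check_dic[n] += check_dic[new]
--             n = new
--
--         answer[i] = n+1
--         sett.add(n)
--         check_dic[n] = 1
--
--     return answer
-- ===== SOURCE B (Python) =====
-- def solution(k, room_number):
--     occupied = set()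
--     answer = []
--     for r in room_number:
--         n = r
--         while n in occupied:
--             n += 1
--         answer.append(n)
--         occupied.add(n)
--     return answer
-- ===== Notes on version B (the rewrite author's own statement) =====
-- stated objective: simpler
-- what changed: Replaced the offset-dictionary with path-compression-style jumps by a plain occupied set with a linear probe to the next free room; the answer (smallest free room >= request) is identical.
import Mathlib
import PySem

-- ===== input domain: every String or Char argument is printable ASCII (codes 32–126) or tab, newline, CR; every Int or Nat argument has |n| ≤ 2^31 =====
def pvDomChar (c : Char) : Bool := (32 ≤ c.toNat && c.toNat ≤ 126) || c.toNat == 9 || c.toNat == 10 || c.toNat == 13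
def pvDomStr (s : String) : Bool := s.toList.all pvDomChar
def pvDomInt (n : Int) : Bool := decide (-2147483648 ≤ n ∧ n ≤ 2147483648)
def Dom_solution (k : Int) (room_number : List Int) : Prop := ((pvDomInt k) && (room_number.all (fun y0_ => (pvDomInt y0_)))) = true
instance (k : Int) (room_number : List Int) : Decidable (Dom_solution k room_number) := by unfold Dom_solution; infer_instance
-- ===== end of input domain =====

-- B replaces A's offset-dictionary jump scheme by a plain occupied set with a linear probe
-- to the next free room; equal output (the smallest free room ≥ each request), simpler code.

-- ===== PORT A =====
-- the inner 'while n in sett' loop; fuel only makes it total (never exhausted on reachable states)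
def pvAProbe (fuel : Nat) (sett : PySem.Set Int) (d : PySem.Dict Int Int) (n : Int) :
    Int × PySem.Dict Int Int :=
  match fuel with
  | 0 => (n, d)
  | fuel + 1 =>
    if PySem.Set.contains sett n then
      let off := d.getD n 0
      let new := n + off
      let d1 := d.insert n (off + 1)
      let d2 := if PySem.Set.contains sett new then d1.insert n (off + 1 + d1.getD new 0) else d1
      pvAProbe fuel sett d2 new
    else (n, d)

-- the outer 'for i in range(len(room_number))' loop (answer[i] is written in index order = appended)
def pvALoop (fuel : Nat) (sett : PySem.Set Int) (d : PySem.Dict Int Int)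
    (rooms : List Int) (acc : List Int) : List Int :=
  match rooms with
  | [] => acc
  | r :: rest =>
    let p := pvAProbe fuel sett d (r - 1)
    pvALoop fuel (PySem.Set.add sett p.1) (p.2.insert p.1 1) rest (acc ++ [p.1 + 1])

def solution (k : Int) (room_number : List Int) : List Int :=
  pvALoop (room_number.length + 1) PySem.Set.empty PySem.Dict.empty room_number []

-- ===== PORT B =====
-- 'while n in occupied: n += 1'; fuel only makes it total (never exhausted on reachable states)
def pvBProbe (fuel : Nat) (occ : PySem.Set Int) (n : Int) : Int :=
  match fuel with
  | 0 => n
  | fuel + 1 => if PySem.Set.contains occ n then pvBProbe fuel occ (n + 1) else n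

def pvBLoop (fuel : Nat) (occ : PySem.Set Int) (rooms : List Int) (acc : List Int) : List Int :=
  match rooms with
  | [] => acc
  | r :: rest =>
    let n := pvBProbe fuel occ r
    pvBLoop fuel (PySem.Set.add occ n) rest (acc ++ [n])

def solution_alt (k : Int) (room_number : List Int) : List Int :=
  pvBLoop (room_number.length + 1) PySem.Set.empty room_number []

-- ===== PRECONDITION & SPEC =====
def Spec_solution (k : Int) (room_number : List Int) (out : List Int) : Prop := out = solution_alt k room_number
instance (k : Int) (room_number : List Int) (out : List Int) : Decidable (Spec_solution k room_number out) := by unfold Spec_solution; infer_instance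

-- ===== CLAIM (what is proved, stated in full; the proofs are below) =====
def Claim_equal_solution : Prop := ∀ (k : Int) (room_number : List Int), Dom_solution k room_number → Spec_solution k room_number (solution k room_number)

-- ===== LEMMAS AND PROOFS =====

-- r is the first room ≥ start that is not in S
def pvFirstFree (S : List Int) (start r : Int) : Prop :=
  start ≤ r ∧ r ∉ S ∧ ∀ m, start ≤ m → m < r → m ∈ S

-- A's probe invariant: the offset dictionary is 0 outside the occupied set, and every stored
-- offset skips only rooms that are occupied or the current/next probe position
def pvInvP (s : List Int) (d : PySem.Dict Int Int) (pos : Int) : Prop :=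
  (∀ x : Int, x ∉ s → d.getD x 0 = 0) ∧
  ∀ x ∈ s, 1 ≤ d.getD x 0 ∧ ∀ m, x ≤ m → m < x + d.getD x 0 →
    m ∈ s ∨ m = pos ∨ m = pos + d.getD pos 0

-- between requests the invariant holds for every probe position (no anticipated room yet)
def pvInv0 (s : List Int) (d : PySem.Dict Int Int) : Prop :=
  (∀ x : Int, x ∉ s → d.getD x 0 = 0) ∧
  ∀ x ∈ s, 1 ≤ d.getD x 0 ∧ ∀ m, x ≤ m → m < x + d.getD x 0 → m ∈ s

lemma pvInv0_invP {s : List Int} {d : PySem.Dict Int Int} (h : pvInv0 s d) (pos : Int) :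
    pvInvP s d pos := by
  refine ⟨h.1, ?_⟩
  intro x hx
  obtain ⟨h1, h2⟩ := h.2 x hx
  exact ⟨h1, fun m hm1 hm2 => Or.inl (h2 m hm1 hm2)⟩

lemma pvFirstFree_unique {S : List Int} {a r1 r2 : Int}
    (h1 : pvFirstFree S a r1) (h2 : pvFirstFree S a r2) : r1 = r2 := by
  obtain ⟨ha1, hn1, hall1⟩ := h1
  obtain ⟨ha2, hn2, hall2⟩ := h2
  by_contra hne
  rcases lt_or_gt_of_ne hne with h | h
  · exact hn1 (hall2 r1 ha1 h)
  · exact hn2 (hall1 r2 ha2 h)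

theorem filt_mono (n new : Int) (hlt : n < new) : ∀ (t : List Int), (t.filter (fun x => decide (new ≤ x))).length ≤ (t.filter (fun x => decide (n ≤ x))).length := by
  intro t
  induction t with
  | nil => simp
  | cons a t ih =>
    simp only [List.filter_cons]
    by_cases hb : new ≤ a
    · have ha : n ≤ a := by omega
      simp [ha, hb]; omega
    · by_cases ha : n ≤ a <;> simp [ha, hb] <;> omega

theorem pvFilter_lt {s : List Int} {n new : Int} (hmem : n ∈ s) (hlt : n < new) :
    (s.filter (fun x => decide (new ≤ x))).length < (s.filter (fun x => decide (n ≤ x))).length := by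
  induction s with
  | nil => simp at hmem
  | cons a t ih =>
    simp only [List.filter_cons]
    rcases List.mem_cons.mp hmem with rfl | h
    · have hb : ¬ new ≤ n := by omega
      simp [hb]
      have := filt_mono n new hlt t; omega
    · have := ih h
      by_cases hb : new ≤ a
      · have ha : n ≤ a := by omega
        simp [ha, hb]; omega
      · by_cases ha : n ≤ a <;> simp [ha, hb] <;> omega

lemma pvBProbe_spec : ∀ (fuel : Nat) (occ : PySem.Set Int) (n : Int),
    (occ.filter (fun x => decide (n ≤ x))).length < fuel →
    pvFirstFree occ n (pvBProbe fuel occ n) := by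
  intro fuel
  induction fuel with
  | zero => intro occ n h; omega
  | succ fuel ih =>
    intro occ n h
    rw [pvBProbe]
    by_cases hm : n ∈ occ
    · have hc : PySem.Set.contains occ n = true := (PySem.Set.contains_iff occ n).mpr hm
      simp only [hc, if_true]
      have hrec := ih occ (n + 1) (by
        have := pvFilter_lt hm (show n < n + 1 by omega)
        omega)
      obtain ⟨h1, h2, h3⟩ := hrec
      refine ⟨by omega, h2, ?_⟩
      intro m hm1 hm2
      by_cases he : m = n
      · subst he; exact hm
      · exact h3 m (by omega) hm2
    · have hc : PySem.Set.contains occ n = false := by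
        by_contra hh
        exact hm ((PySem.Set.contains_iff occ n).mp (by simpa using hh))
      simp only [hc, if_false, Bool.false_eq_true]
      exact ⟨le_refl n, hm, by intro m h1 h2; omega⟩

lemma pvAProbe_spec : ∀ (fuel : Nat) (s : PySem.Set Int) (d : PySem.Dict Int Int) (n : Int),
    pvInvP s d n →
    (s.filter (fun x => decide (n ≤ x))).length < fuel →
    pvFirstFree s n (pvAProbe fuel s d n).1 ∧ pvInvP s (pvAProbe fuel s d n).2 (pvAProbe fuel s d n).1 := by
  intro fuel
  induction fuel with
  | zero => intro s d n _ h; omega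
  | succ fuel ih =>
    intro s d n hinv h
    obtain ⟨hzero, hocc⟩ := hinv
    rw [pvAProbe]
    by_cases hm : n ∈ s
    · have hc : PySem.Set.contains s n = true := (PySem.Set.contains_iff s n).mpr hm
      simp only [hc, if_true]
      obtain ⟨hoff1, hrange⟩ := hocc n hm
      set off := d.getD n 0 with hoffdef
      set new := n + off with hnewdef
      have hlt : n < new := by omega
      have hcov : ∀ m, n ≤ m → m < new → m ∈ s := by
        intro m h1 h2
        rcases hrange m h1 h2 with hh | hh | hh
        · exact hh
        · exact hh ▸ hm
        · omega
      have hnewne : new ≠ n := by omega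
      set d1 := d.insert n (off + 1) with hd1
      set d2 := if PySem.Set.contains s new then d1.insert n (off + 1 + d1.getD new 0) else d1 with hd2
      have hd2_other : ∀ x : Int, x ≠ n → d2.getD x 0 = d.getD x 0 := by
        intro x hx
        rw [hd2]
        split
        · rw [PySem.Dict.getD_insert_of_ne _ _ _ hx, hd1, PySem.Dict.getD_insert_of_ne _ _ _ hx]
        · rw [hd1, PySem.Dict.getD_insert_of_ne _ _ _ hx]
      have hd1new : d1.getD new 0 = d.getD new 0 := by
        rw [hd1, PySem.Dict.getD_insert_of_ne _ _ _ hnewne]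
      have hd2new : d2.getD new 0 = d.getD new 0 := hd2_other new hnewne
      have hinv2 : pvInvP s d2 new := by
        refine ⟨?_, ?_⟩
        · intro x hx
          have hxn : x ≠ n := fun he => hx (he ▸ hm)
          rw [hd2_other x hxn]; exact hzero x hx
        · intro x hxs
          by_cases hx : x = n
          · subst hx
            by_cases hnew : new ∈ s
            · have hcn : PySem.Set.contains s new = true := (PySem.Set.contains_iff s new).mpr hnew
              have hdx : d2.getD x 0 = off + 1 + d.getD new 0 := by
                rw [hd2, hcn, if_pos rfl, PySem.Dict.getD_insert_self, hd1new]
              obtain ⟨hno1, hnr⟩ := hocc new hnew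
              refine ⟨by omega, ?_⟩
              intro m h1 h2
              rw [hdx] at h2
              rw [hd2new]
              by_cases hmlt : m < new
              · exact Or.inl (hcov m h1 hmlt)
              · by_cases hm2 : m < new + d.getD new 0
                · rcases hnr m (by omega) (by omega) with hh | hh | hh
                  · exact Or.inl hh
                  · exact Or.inl (hh ▸ hm)
                  · omega
                · right; right; omega
            · have hcn : PySem.Set.contains s new = false := by
                by_contra hh
                exact hnew ((PySem.Set.contains_iff s new).mp (by simpa using hh))
              have hdx : d2.getD x 0 = off + 1 := by
                rw [hd2, hcn, if_neg (by simp), hd1, PySem.Dict.getD_insert_self]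
              refine ⟨by omega, ?_⟩
              intro m h1 h2
              rw [hdx] at h2
              by_cases hmlt : m < new
              · exact Or.inl (hcov m h1 hmlt)
              · right; left; omega
          · obtain ⟨h1, h2⟩ := hocc x hxs
            rw [hd2_other x hx]
            refine ⟨h1, ?_⟩
            intro m hm1 hm2
            rcases h2 m hm1 hm2 with hh | hh | hh
            · exact Or.inl hh
            · exact Or.inl (hh ▸ hm)
            · right; left; omega
      have hfuel2 : (s.filter (fun x => decide (new ≤ x))).length < fuel := by
        have := pvFilter_lt hm hlt
        omega
      obtain ⟨⟨hf1, hf2, hf3⟩, hinv3⟩ := ih s d2 new hinv2 hfuel2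
      refine ⟨⟨by omega, hf2, ?_⟩, hinv3⟩
      intro m h1 h2
      by_cases hmlt : m < new
      · exact hcov m h1 hmlt
      · exact hf3 m (by omega) h2
    · have hc : PySem.Set.contains s n = false := by
        by_contra hh
        exact hm ((PySem.Set.contains_iff s n).mp (by simpa using hh))
      simp only [hc, Bool.false_eq_true, if_false]
      exact ⟨⟨le_refl n, hm, by intro m h1 h2; omega⟩, hzero, hocc⟩


lemma pvMem_map_add_one {s : List Int} {m : Int} : m ∈ s.map (· + 1) ↔ m - 1 ∈ s := by
  rw [List.mem_map]
  constructor
  · rintro ⟨a, ha, rfl⟩; simpa using ha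
  · intro h; exact ⟨m - 1, h, by omega⟩

lemma pvLoop_eq : ∀ (rooms : List Int) (sA : PySem.Set Int) (d : PySem.Dict Int Int)
    (acc : List Int) (fuel : Nat),
    pvInv0 sA d →
    sA.length + rooms.length < fuel →
    pvALoop fuel sA d rooms acc = pvBLoop fuel (sA.map (· + 1)) rooms acc := by
  intro rooms
  induction rooms with
  | nil => intro sA d acc fuel _ _; rw [pvALoop, pvBLoop]
  | cons r rest ih =>
    intro sA d acc fuel hinv hfuel
    rw [pvALoop, pvBLoop]
    set occ : PySem.Set Int := sA.map (· + 1) with hocc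
    have hfa : (sA.filter (fun x => decide (r - 1 ≤ x))).length < fuel := by
      have := List.length_filter_le (fun x => decide (r - 1 ≤ x)) sA
      omega
    have hfb : (occ.filter (fun x => decide (r ≤ x))).length < fuel := by
      have := List.length_filter_le (fun x => decide (r ≤ x)) occ
      have : occ.length = sA.length := by simp [hocc]
      omega
    obtain ⟨hffA, hpost⟩ := pvAProbe_spec fuel sA d (r - 1) (pvInv0_invP hinv (r - 1)) hfa
    have hffB := pvBProbe_spec fuel occ r hfb
    set nA := (pvAProbe fuel sA d (r - 1)).1 with hnA
    set nB := pvBProbe fuel occ r with hnB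
    -- B's first free room, shifted down by one, is first-free for A's set
    have hshift : pvFirstFree sA (r - 1) (nB - 1) := by
      obtain ⟨h1, h2, h3⟩ := hffB
      refine ⟨by omega, ?_, ?_⟩
      · intro hmem
        exact h2 (pvMem_map_add_one.mpr (by simpa using hmem))
      · intro m hm1 hm2
        have : m + 1 ∈ occ := h3 (m + 1) (by omega) (by omega)
        have := pvMem_map_add_one.mp this
        simpa using this
    have heq : nA = nB - 1 := pvFirstFree_unique hffA hshift
    have hnAmem : nA ∉ sA := hffA.2.1
    have hnBmem : nB ∉ occ := hffB.2.1
    -- the two new occupied sets still correspond by the +1 shift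
    have hadd : PySem.Set.add occ nB = (sA ++ [nA]).map (· + 1) := by
      rw [PySem.Set.add_of_not_mem hnBmem, hocc, List.map_append]
      simp [heq]
    have haddA : PySem.Set.add sA nA = sA ++ [nA] := PySem.Set.add_of_not_mem hnAmem
    -- the invariant survives occupying nA with offset 1
    have hinv' : pvInv0 (sA ++ [nA]) ((pvAProbe fuel sA d (r - 1)).2.insert nA 1) := by
      obtain ⟨hz, ho⟩ := hpost
      have hzA : (pvAProbe fuel sA d (r - 1)).2.getD nA 0 = 0 := hz nA hnAmem
      refine ⟨?_, ?_⟩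
      · intro x hx
        have hx1 : x ∉ sA := fun h => hx (List.mem_append.mpr (Or.inl h))
        have hx2 : x ≠ nA := fun h => hx (List.mem_append.mpr (Or.inr (by simp [h])))
        rw [PySem.Dict.getD_insert_of_ne _ _ _ hx2]
        exact hz x hx1
      · intro x hxmem
        rcases List.mem_append.mp hxmem with hxs | hxa
        · have hx2 : x ≠ nA := fun h => hnAmem (h ▸ hxs)
          rw [PySem.Dict.getD_insert_of_ne _ _ _ hx2]
          obtain ⟨h1, h2⟩ := ho x hxs
          refine ⟨h1, ?_⟩
          intro m hm1 hm2
          rcases h2 m hm1 hm2 with hh | hh | hh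
          · exact List.mem_append.mpr (Or.inl hh)
          · exact List.mem_append.mpr (Or.inr (by simp [hh]))
          · rw [hzA] at hh
            exact List.mem_append.mpr (Or.inr (by simp [hh]))
        · have hx : x = nA := by simpa using hxa
          rw [hx, PySem.Dict.getD_insert_self]
          refine ⟨by omega, ?_⟩
          intro m hm1 hm2
          have hmna : m = nA := by omega
          exact List.mem_append.mpr (Or.inr (by simp [hmna]))
    have hlen : (sA ++ [nA]).length + rest.length < fuel := by
      rw [List.length_append]
      simp only [List.length_cons, List.length_nil]
      simp at hfuel ⊢
      omega
    rw [haddA, hadd, ih (sA ++ [nA]) _ _ fuel hinv' hlen]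
    have : nA + 1 = nB := by omega
    rw [this]

-- ===== VERDICT (by name: the statement is the Claim_ definition above) =====
theorem solution_spec : Claim_equal_solution := by
  intro k room_number _
  unfold Spec_solution solution solution_alt
  have h0 : pvInv0 PySem.Set.empty PySem.Dict.empty := by
    constructor
    · intro x _; rfl
    · intro x hx; simp [PySem.Set.empty] at hx
  have := pvLoop_eq room_number PySem.Set.empty PySem.Dict.empty []
    (room_number.length + 1) h0 (by simp [PySem.Set.empty])
  simpa [PySem.Set.empty] using this
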